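-- pv_equiv track=rewrite | github.com/PSU-Capstone-Winter-Spring-2021/Eviction-Sponge | src/backend/pdf_creator.py | fit_address
-- ===== SOURCE A (Python) =====
-- def fit_address(address):
--     first_line = 22
--     first_line_full = False
--     second_line = 72
--     second_line_full = False
--     third_line = 65
--     third_line_full = False
--     first_line_string = ''
--     second_line_string = ''
--     third_line_string = ''
--     address_list = address.split()
--     for stuff in address_list:
--         if len(stuff) > first_line or first_line_full:
--             first_line_full = True
--             if len(stuff) > second_line or second_line_full:
--                 second_line_full = True
--                 if len(stuff) > third_line or third_line_full:
--                     third_line_full = True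
--                     # this is sticking everything extra on the third line; isn't optimal
--                     third_line_string += stuff + " "
--                 else:
--                     third_line_string += stuff + " "
--                     third_line = third_line - len(stuff) - 1
--                     continue
--             else:
--                 second_line_string += stuff + " "
--                 second_line = second_line - len(stuff) - 1
--                 continue
--         else:
--             first_line_string += stuff + " "
--             first_line = first_line - len(stuff) - 1
--             continue
--
--     address_output = [first_line_string, second_line_string, third_line_string]
--     return address_output
-- ===== SOURCE B (Python) =====
-- def _fill(ws, cap):
--     # count the prefix of ws that fits into a line of remaining width cap
--     n = 0
--     for w in ws:
--         if len(w) > cap: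
--             break
--         cap -= len(w) + 1
--         n += 1
--     return n
--
-- def _line(ws):
--     return ''.join(w + ' ' for w in ws)
--
-- def fit_address(address):
--     # staged: first partition the word list into three contiguous segments, then render each
--     words = address.split()
--     i = _fill(words, 22)
--     rest = words[i:]
--     k = _fill(rest, 72)
--     return [_line(words[:i]), _line(rest[:k]), _line(rest[k:])]
-- ===== Notes on version B (the rewrite author's own statement) =====
-- stated objective: alternative
-- what changed: Replaces A's single-pass nested-if/boolean-flag state machine by a staged algorithm: two boundary-finding passes first partition the word list into three contiguous segments (prefix that fits 22, prefix of the rest that fits 72, remainder), then each segment is rendered independently with a join.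
import Mathlib
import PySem

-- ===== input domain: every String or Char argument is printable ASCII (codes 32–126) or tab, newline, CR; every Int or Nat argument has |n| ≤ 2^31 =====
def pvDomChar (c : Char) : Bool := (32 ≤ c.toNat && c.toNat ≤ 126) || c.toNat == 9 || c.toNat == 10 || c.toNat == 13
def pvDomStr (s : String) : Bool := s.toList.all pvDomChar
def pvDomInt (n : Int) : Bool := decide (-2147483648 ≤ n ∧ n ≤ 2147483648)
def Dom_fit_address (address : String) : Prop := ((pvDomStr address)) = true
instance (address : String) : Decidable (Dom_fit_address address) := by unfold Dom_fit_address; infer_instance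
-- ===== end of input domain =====

-- B replaces A's nested-if/flag state machine by staged passes: partition the word list
-- into three contiguous segments first, then render each segment by a join (alternative decomposition).

-- ===== PORT A =====
-- state: (first_line, first_line_full, second_line, second_line_full, third_line, third_line_full,
--         first_line_string, second_line_string, third_line_string)
def fitA_step (st : Int × Bool × Int × Bool × Int × Bool × String × String × String)
    (stuff : String) : Int × Bool × Int × Bool × Int × Bool × String × String × String :=
  match st with
  | (f1, f1F, f2, f2F, f3, f3F, s1, s2, s3) =>
    let L : Int := PySem.Str.len stuff
    if decide (L > f1) || f1F then
      if decide (L > f2) || f2F then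
        if decide (L > f3) || f3F then
          (f1, true, f2, true, f3, true, s1, s2, s3 ++ (stuff ++ " "))
        else
          (f1, true, f2, true, f3 - L - 1, f3F, s1, s2, s3 ++ (stuff ++ " "))
      else
        (f1, true, f2 - L - 1, f2F, f3, f3F, s1, s2 ++ (stuff ++ " "), s3)
    else
      (f1 - L - 1, f1F, f2, f2F, f3, f3F, s1 ++ (stuff ++ " "), s2, s3)

def fit_address (address : String) : List String :=
  let st := (PySem.Str.split₀ address).foldl fitA_step (22, false, 72, false, 65, false, "", "", "")
  [st.2.2.2.2.2.2.1, st.2.2.2.2.2.2.2.1, st.2.2.2.2.2.2.2.2]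

-- ===== PORT B =====
-- _fill(ws, cap): length of the prefix of ws that fits into remaining width cap
def fitB_fill : List String → Int → Nat
  | [], _ => 0
  | w :: ws, cap =>
    if PySem.Str.len w > cap then 0
    else fitB_fill ws (cap - PySem.Str.len w - 1) + 1

-- _line(ws) = ''.join(w + ' ' for w in ws)
def fitB_line (ws : List String) : String :=
  ws.foldl (fun acc w => acc ++ (w ++ " ")) ""

-- words[:i] / words[i:] with 0 ≤ i ≤ len are List.take / List.drop (exact here)
def fit_address_alt (address : String) : List String :=
  let words := PySem.Str.split₀ address
  let i := fitB_fill words 22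
  let rest := words.drop i
  let k := fitB_fill rest 72
  [fitB_line (words.take i), fitB_line (rest.take k), fitB_line (rest.drop k)]

-- ===== PRECONDITION & SPEC =====
def Spec_fit_address (address : String) (out : List String) : Prop := out = fit_address_alt address
instance (address : String) (out : List String) : Decidable (Spec_fit_address address out) := by unfold Spec_fit_address; infer_instance

-- ===== CLAIM (what is proved, stated in full; the proofs are below) =====
def Claim_equal_fit_address : Prop := ∀ (address : String), Dom_fit_address address → Spec_fit_address address (fit_address address)

-- ===== LEMMAS AND PROOFS =====

/-- join with trailing spaces, recursive form used by the proofs. -/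
def joinSp : List String → String
  | [] => ""
  | w :: ws => (w ++ " ") ++ joinSp ws

theorem fitB_line_eq_aux (ws : List String) (s : String) :
    ws.foldl (fun acc w => acc ++ (w ++ " ")) s = s ++ joinSp ws := by
  induction ws generalizing s with
  | nil => simp [joinSp]
  | cons w ws ih => simp [joinSp, List.foldl, ih, String.append_assoc]

theorem fitB_line_eq (ws : List String) : fitB_line ws = joinSp ws := by
  simp [fitB_line, fitB_line_eq_aux]

def pvStrs (st : Int × Bool × Int × Bool × Int × Bool × String × String × String) :
    String × String × String :=
  (st.2.2.2.2.2.2.1, st.2.2.2.2.2.2.2.1, st.2.2.2.2.2.2.2.2)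

/-- Phase 3: once the first two lines are full, every word lands on line 3. -/
theorem phase3 (ws : List String) (f1 f2 f3 : Int) (f3F : Bool) (s1 s2 s3 : String) :
    pvStrs (ws.foldl fitA_step (f1, true, f2, true, f3, f3F, s1, s2, s3)) =
      (s1, s2, s3 ++ joinSp ws) := by
  induction ws generalizing f3 f3F s3 with
  | nil => simp [pvStrs, joinSp]
  | cons w ws ih =>
    simp only [List.foldl, fitA_step]
    split_ifs <;> simp_all [String.append_assoc, joinSp]

/-- Phase 2: first line full, second line has remaining width `c`, third line untouched. -/
theorem phase2 (ws : List String) (f1 c : Int) (s1 s2 : String) :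
    pvStrs (ws.foldl fitA_step (f1, true, c, false, 65, false, s1, s2, "")) =
      (s1, s2 ++ joinSp (ws.take (fitB_fill ws c)), joinSp (ws.drop (fitB_fill ws c))) := by
  induction ws generalizing c s2 with
  | nil => simp [pvStrs, joinSp]
  | cons w ws ih =>
    by_cases hL : c < (w.length : Int)
    · have h0 : fitB_fill (w :: ws) c = 0 := by simp [fitB_fill, PySem.Str.len, hL]
      simp only [List.foldl, fitA_step, h0]
      split_ifs <;> try (exfalso; omega)
      all_goals simp_all [phase3, joinSp, String.append_assoc, PySem.Str.len]
    · have h1 : fitB_fill (w :: ws) c = fitB_fill ws (c - (w.length : Int) - 1) + 1 := by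
        simp [fitB_fill, PySem.Str.len, hL]
      simp only [List.foldl, fitA_step, h1]
      split_ifs <;> try (exfalso; simp_all [PySem.Str.len]; omega)
      all_goals simp_all [ih, joinSp, String.append_assoc, PySem.Str.len]

/-- Phase 1: the fold from the initial state, with first-line width `c`. -/
theorem phase1 (ws : List String) (c : Int) (s1 : String) :
    pvStrs (ws.foldl fitA_step (c, false, 72, false, 65, false, s1, "", "")) =
      (s1 ++ joinSp (ws.take (fitB_fill ws c)),
       joinSp ((ws.drop (fitB_fill ws c)).take (fitB_fill (ws.drop (fitB_fill ws c)) 72)),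
       joinSp ((ws.drop (fitB_fill ws c)).drop (fitB_fill (ws.drop (fitB_fill ws c)) 72))) := by
  induction ws generalizing c s1 with
  | nil => simp [pvStrs, joinSp]
  | cons w ws ih =>
    by_cases hL : c < (w.length : Int)
    · have h0 : fitB_fill (w :: ws) c = 0 := by simp [fitB_fill, PySem.Str.len, hL]
      have hstep : fitA_step (c, false, 72, false, 65, false, s1, "", "") w =
          fitA_step (c, true, 72, false, 65, false, s1, "", "") w := by
        simp [fitA_step, PySem.Str.len, hL]
      calc pvStrs ((w :: ws).foldl fitA_step (c, false, 72, false, 65, false, s1, "", ""))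
          = pvStrs ((w :: ws).foldl fitA_step (c, true, 72, false, 65, false, s1, "", "")) := by
            simp only [List.foldl, hstep]
        _ = _ := by
            rw [phase2]
            simp [h0, joinSp]
    · have h1 : fitB_fill (w :: ws) c = fitB_fill ws (c - (w.length : Int) - 1) + 1 := by
        simp [fitB_fill, PySem.Str.len, hL]
      simp only [List.foldl, fitA_step, h1]
      split_ifs <;> try (exfalso; simp_all [PySem.Str.len]; omega)
      all_goals simp_all [ih, joinSp, String.append_assoc, PySem.Str.len]

-- ===== VERDICT (by name: the statement is the Claim_ definition above) =====
theorem fit_address_spec : Claim_equal_fit_address := by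
  intro address _
  unfold Spec_fit_address fit_address fit_address_alt
  have h := phase1 (PySem.Str.split₀ address) 22 ""
  simp only [pvStrs, Prod.mk.injEq] at h
  obtain ⟨h1, h2, h3⟩ := h
  simp [fitB_line_eq, h1, h2, h3]
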